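-- pv_equiv track=rewrite | github.com/bendourthe/local-ai-chat | src/gui/styles.py | _nest_theme
-- ===== SOURCE A (Python) =====
-- from typing import Dict, Optional
--
-- SECTION_DEFS = {
--     "main_app": ["APP_BG","BORDER"],
--     "app_top_bar": ["TOPBAR_BG","MODEL_BG"],
--     "chat_history": ["SIDEBAR_BG","CHAT_LIST_BG","CHAT_LIST_ITEM_SELECTED_BG"],
--     "chat_area": ["CHAT_OUTER_BG","CHAT_INNER_BG","BUBBLE_USER","BUBBLE_AI"],
--     "typing_area": ["TYPING_BAR_BG","TYPING_BAR_OUTLINE","TYPING_AREA_BG"],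
--     "buttons": ["NEWCHAT_BUTTON_BG","DELETE_BUTTON_BG","SEND_BG"],
--     "text": ["TEXT_PRIMARY","TEXT_MUTED"],
-- }
--
-- def _nest_theme(flat: Dict[str, str]) -> Dict[str, Dict[str, str]]:
--     """Nest a flat theme dict into sections defined by SECTION_DEFS."""
--     nested: Dict[str, Dict[str, str]] = {}
--     # Ensure deterministic order by iterating SECTION_DEFS
--     assigned = set()
--     for sec, keys in SECTION_DEFS.items():
--         grp = {k: flat[k] for k in keys if k in flat}
--         if grp:
--             nested[sec] = grp
--             assigned.update(grp.keys())
--     # Place any remaining keys into a Misc section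
--     # Ignore any keys not in SECTION_DEFS to avoid Misc section
--     return nested
-- ===== SOURCE B (Python) =====
-- from typing import Dict
--
-- SECTION_DEFS = {
--     "main_app": ["APP_BG","BORDER"],
--     "app_top_bar": ["TOPBAR_BG","MODEL_BG"],
--     "chat_history": ["SIDEBAR_BG","CHAT_LIST_BG","CHAT_LIST_ITEM_SELECTED_BG"],
--     "chat_area": ["CHAT_OUTER_BG","CHAT_INNER_BG","BUBBLE_USER","BUBBLE_AI"],
--     "typing_area": ["TYPING_BAR_BG","TYPING_BAR_OUTLINE","TYPING_AREA_BG"],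
--     "buttons": ["NEWCHAT_BUTTON_BG","DELETE_BUTTON_BG","SEND_BG"],
--     "text": ["TEXT_PRIMARY","TEXT_MUTED"],
-- }
--
-- # Reverse index: key -> (canonical position, owning section), built once.
-- _KEY_INFO: Dict[str, tuple] = {}
-- for _sec, _keys in SECTION_DEFS.items():
--     for _k in _keys:
--         _KEY_INFO[_k] = (len(_KEY_INFO), _sec)
--
-- def _nest_theme(flat: Dict[str, str]) -> Dict[str, Dict[str, str]]:
--     """Nest a flat theme dict into sections defined by SECTION_DEFS."""
--     # One pass over the input: keep known keys, then restore canonical order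
--     # by sorting on the precomputed position.
--     hits = sorted((k for k in flat if k in _KEY_INFO),
--                   key=lambda k: _KEY_INFO[k][0])
--     nested: Dict[str, Dict[str, str]] = {}
--     for k in hits:
--         nested.setdefault(_KEY_INFO[k][1], {})[k] = flat[k]
--     return nested
-- ===== Notes on version B (the rewrite author's own statement) =====
-- stated objective: alternative
-- what changed: A scans the section table and probes the input with a per-section dict comprehension plus a non-emptiness check; B precomputes a reverse index key->(canonical position, section) once, makes a single pass over the INPUT dict keeping known keys, restores canonical order with one sort on the precomputed position, and groups with setdefault - the traversal direction is flipped from table-driven to input-driven.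
import Mathlib
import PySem

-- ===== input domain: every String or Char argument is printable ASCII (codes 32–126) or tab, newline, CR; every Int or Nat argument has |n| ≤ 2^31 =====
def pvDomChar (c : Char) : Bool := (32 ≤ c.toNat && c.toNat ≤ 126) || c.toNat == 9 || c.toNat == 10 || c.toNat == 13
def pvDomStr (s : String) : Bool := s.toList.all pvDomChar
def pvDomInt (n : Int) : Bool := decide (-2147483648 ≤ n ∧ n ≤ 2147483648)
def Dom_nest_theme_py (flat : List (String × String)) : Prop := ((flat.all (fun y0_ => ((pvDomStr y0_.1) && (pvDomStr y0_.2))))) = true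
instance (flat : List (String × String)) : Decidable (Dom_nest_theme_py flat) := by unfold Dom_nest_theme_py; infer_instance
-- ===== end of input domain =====

-- B flips A's table-driven scan (per-section dict comprehension over flat) into an input-driven
-- pass: a precomputed reverse index key->(position, section), one filtered pass over the input's
-- keys, a sort on the precomputed position, and setdefault grouping; objective: alternative.

-- ===== PORT A =====
def SECTION_DEFS : List (String × List String) := [
  ("main_app", ["APP_BG","BORDER"]),
  ("app_top_bar", ["TOPBAR_BG","MODEL_BG"]),
  ("chat_history", ["SIDEBAR_BG","CHAT_LIST_BG","CHAT_LIST_ITEM_SELECTED_BG"]),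
  ("chat_area", ["CHAT_OUTER_BG","CHAT_INNER_BG","BUBBLE_USER","BUBBLE_AI"]),
  ("typing_area", ["TYPING_BAR_BG","TYPING_BAR_OUTLINE","TYPING_AREA_BG"]),
  ("buttons", ["NEWCHAT_BUTTON_BG","DELETE_BUTTON_BG","SEND_BG"]),
  ("text", ["TEXT_PRIMARY","TEXT_MUTED"])]

def nest_theme_py (flat : List (String × String)) : List (String × List (String × String)) :=
  let flatD := PySem.Dict.ofList flat
  -- for sec, keys in SECTION_DEFS.items(): grp = {k: flat[k] for k in keys if k in flat}; if grp: nested[sec] = grp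
  let nested := SECTION_DEFS.foldl (fun nested sk =>
      let grp : PySem.Dict String String := sk.2.foldl (fun g k =>
          match flatD.get? k with
          | some v => g.insert k v
          | none => g) PySem.Dict.empty
      if grp.size ≠ 0 then nested.insert sk.1 grp else nested)
    (PySem.Dict.empty : PySem.Dict String (PySem.Dict String String))
  nested.items.map (fun q => (q.1, q.2.items))

-- ===== PORT B =====
-- _KEY_INFO = {}; for sec, keys in SECTION_DEFS.items(): for k in keys: _KEY_INFO[k] = (len(_KEY_INFO), sec)
def KEY_INFO : PySem.Dict String (Int × String) :=
  SECTION_DEFS.foldl (fun d sk => sk.2.foldl (fun d k => d.insert k ((d.size : Int), sk.1)) d)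
    PySem.Dict.empty

def nest_theme_py_alt (flat : List (String × String)) : List (String × List (String × String)) :=
  let flatD := PySem.Dict.ofList flat
  -- hits = sorted((k for k in flat if k in _KEY_INFO), key=lambda k: _KEY_INFO[k][0])
  -- _KEY_INFO[k] ported as getD with a dummy default: exact, every k of hits is a key of _KEY_INFO
  let hits := PySem.List.sorted (flatD.keys.filter (fun k => KEY_INFO.contains k))
      (fun k => (KEY_INFO.getD k (0, "")).1) false
  -- for k in hits: nested.setdefault(_KEY_INFO[k][1], {})[k] = flat[k]   (flat[k]: k in flat, so getD is exact)
  let nested := hits.foldl (fun d k =>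
      d.modify ((KEY_INFO.getD k (0, "")).2) PySem.Dict.empty
        (fun g => g.insert k (flatD.getD k ""))) 
    (PySem.Dict.empty : PySem.Dict String (PySem.Dict String String))
  nested.items.map (fun q => (q.1, q.2.items))

-- ===== PRECONDITION & SPEC =====
def Spec_nest_theme_py (flat : List (String × String)) (out : List (String × List (String × String))) : Prop := out = nest_theme_py_alt flat
instance (flat : List (String × String)) (out : List (String × List (String × String))) : Decidable (Spec_nest_theme_py flat out) := by unfold Spec_nest_theme_py; infer_instance

-- ===== CLAIM (what is proved, stated in full; the proofs are below) =====
def Claim_equal_nest_theme_py : Prop := ∀ (flat : List (String × String)), Dom_nest_theme_py flat → Spec_nest_theme_py flat (nest_theme_py flat)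

-- ===== LEMMAS AND PROOFS =====

-- (k, flat[k]) when k in flat
def pvPres (flatD : PySem.Dict String String) (k : String) : Option (String × String) :=
  (flatD.get? k).map (fun v => (k, v))

-- the present (key, value) pairs of one section, in section-key order
def pvGrp (flatD : PySem.Dict String String) (sk : String × List String) : List (String × String) :=
  sk.2.filterMap (pvPres flatD)

-- the common result shape: nonempty sections with their groups
def pvOut (flatD : PySem.Dict String String) (secs : List (String × List String)) :
    List (String × List (String × String)) :=
  secs.filterMap (fun sk => if pvGrp flatD sk = [] then none else some (sk.1, pvGrp flatD sk))

-- the canonical flat key order (SECTION_DEFS flattened)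
def pvCANONK : List String :=
  ["APP_BG","BORDER","TOPBAR_BG","MODEL_BG","SIDEBAR_BG","CHAT_LIST_BG",
   "CHAT_LIST_ITEM_SELECTED_BG","CHAT_OUTER_BG","CHAT_INNER_BG","BUBBLE_USER","BUBBLE_AI",
   "TYPING_BAR_BG","TYPING_BAR_OUTLINE","TYPING_AREA_BG","NEWCHAT_BUTTON_BG",
   "DELETE_BUTTON_BG","SEND_BG","TEXT_PRIMARY","TEXT_MUTED"]

theorem pv_inner_eq (flatD : PySem.Dict String String) (keys : List String)
    (g : PySem.Dict String String) :
    keys.foldl (fun g k =>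
        match flatD.get? k with
        | some v => g.insert k v
        | none => g) g
      = (keys.filterMap (pvPres flatD)).foldl (fun g kv => g.insert kv.1 kv.2) g := by
  induction keys generalizing g with
  | nil => rfl
  | cons k rest ih =>
    cases h : flatD.get? k <;> simp [pvPres, h, ih]

theorem pv_fst_filterMap_pres (flatD : PySem.Dict String String) (keys : List String) :
    (keys.filterMap (pvPres flatD)).map Prod.fst
      = keys.filter (fun k => (flatD.get? k).isSome) := by
  induction keys with
  | nil => rfl
  | cons k rest ih =>
    simp only [pvPres] at ih ⊢
    cases h : flatD.get? k <;> simp [h, ih]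

theorem pv_grp_items (flatD : PySem.Dict String String) (sk : String × List String)
    (hk : sk.2.Nodup) :
    (sk.2.foldl (fun g k =>
        match flatD.get? k with
        | some v => g.insert k v
        | none => g) (PySem.Dict.empty : PySem.Dict String String)).items
      = pvGrp flatD sk := by
  rw [pv_inner_eq]
  have h := PySem.Dict.items_foldl_insert_fresh (sk.2.filterMap (pvPres flatD))
    Prod.fst Prod.snd (PySem.Dict.empty : PySem.Dict String String)
    (by intro a _; simp [PySem.Dict.contains_empty])
    (by rw [pv_fst_filterMap_pres]; exact hk.filter _)
  simpa [pvGrp] using h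

theorem pv_A_fold (flatD : PySem.Dict String String) (secs : List (String × List String))
    (n : PySem.Dict String (PySem.Dict String String))
    (hnames : (secs.map Prod.fst).Nodup)
    (hfree : ∀ sk ∈ secs, n.contains sk.1 = false)
    (hnkeys : n.keys.Nodup)
    (hkeys : ∀ sk ∈ secs, sk.2.Nodup) :
    (secs.foldl (fun nested sk =>
        let grp : PySem.Dict String String := sk.2.foldl (fun g k =>
            match flatD.get? k with
            | some v => g.insert k v
            | none => g) PySem.Dict.empty
        if grp.size ≠ 0 then nested.insert sk.1 grp else nested) n).items.map
          (fun q => (q.1, q.2.items))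
      = n.items.map (fun q => (q.1, q.2.items)) ++ pvOut flatD secs := by
  induction secs generalizing n with
  | nil => simp [pvOut]
  | cons sk rest ih =>
    have hnames' : (sk.1 :: rest.map Prod.fst).Nodup := by simpa using hnames
    have hni : sk.1 ∉ rest.map Prod.fst := (List.nodup_cons.mp hnames').1
    have hitems := pv_grp_items flatD sk (hkeys sk (by simp))
    by_cases hg : pvGrp flatD sk = []
    · have hsz : (sk.2.foldl (fun g k =>
          match flatD.get? k with
          | some v => g.insert k v
          | none => g) (PySem.Dict.empty : PySem.Dict String String)).size = 0 := by
        simp [PySem.Dict.size, hitems, hg]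
      simp only [List.foldl_cons, hsz]
      rw [if_neg (by simp)]
      rw [ih n (by simpa using hnames'.of_cons)
        (fun s hs => hfree s (by simp [hs])) hnkeys (fun s hs => hkeys s (by simp [hs]))]
      simp [pvOut, hg]
    · have hsz : (sk.2.foldl (fun g k =>
          match flatD.get? k with
          | some v => g.insert k v
          | none => g) (PySem.Dict.empty : PySem.Dict String String)).size ≠ 0 := by
        simp only [PySem.Dict.size, hitems]
        simpa using hg
      simp only [List.foldl_cons]
      rw [if_pos hsz]
      rw [ih _ (by simpa using hnames'.of_cons)
        (fun s hs => by
          rw [PySem.Dict.contains_insert]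
          have hne : s.1 ≠ sk.1 := by
            intro he; exact hni (he ▸ List.mem_map_of_mem hs)
          simp [hne, hfree s (by simp [hs])])
        (PySem.Dict.nodup_keys_insert _ _ _ hnkeys)
        (fun s hs => hkeys s (by simp [hs]))]
      rw [PySem.Dict.items_insert_of_not_contains _ _ (hfree sk (by simp))]
      simp [pvOut, hg, hitems]

theorem pv_A_main (flat : List (String × String)) :
    nest_theme_py flat = pvOut (PySem.Dict.ofList flat) SECTION_DEFS := by
  simp only [nest_theme_py]
  rw [pv_A_fold (PySem.Dict.ofList flat) SECTION_DEFS PySem.Dict.empty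
    (by decide) (by intro sk _; rfl) (by simp [PySem.Dict.keys, PySem.Dict.empty])
    (by decide)]
  rfl

-- B side ---------------------------------------------------------------

-- the sort restores the canonical key order
theorem pv_hits_eq (flatD : PySem.Dict String String) (hnd : flatD.keys.Nodup) :
    PySem.List.sorted (flatD.keys.filter (fun k => KEY_INFO.contains k))
      (fun k => (KEY_INFO.getD k (0, "")).1) false
      = pvCANONK.filter (fun k => flatD.contains k) := by
  have hKI : ∀ k, KEY_INFO.contains k = true ↔ k ∈ pvCANONK := by
    intro k
    rw [PySem.Dict.contains_iff_mem_keys, (by decide : KEY_INFO.keys = pvCANONK)]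
  apply PySem.List.sorted_eq_of_perm_of_pairwise_lt
  · apply (List.perm_ext_iff_of_nodup ((by decide : pvCANONK.Nodup).filter _) (hnd.filter _)).mpr
    intro k
    simp only [List.mem_filter]
    constructor
    · rintro ⟨hk, hc⟩
      exact ⟨(PySem.Dict.contains_iff_mem_keys _ _).mp hc, (hKI k).mpr hk⟩
    · rintro ⟨hk, hc⟩
      exact ⟨(hKI k).mp hc, (PySem.Dict.contains_iff_mem_keys _ _).mpr hk⟩
  · exact (by decide : List.Pairwise
      (fun a b => (KEY_INFO.getD a (0, "")).1 < (KEY_INFO.getD b (0, "")).1) pvCANONK).filter _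

-- filter a whole-list fold of modifies down to one group
theorem pv_getD_fold_modify (secf : String → String) (vf : String → String)
    (l : List String) (d : PySem.Dict String (PySem.Dict String String)) (s : String) :
    (l.foldl (fun d k => d.modify (secf k) PySem.Dict.empty (fun g => g.insert k (vf k))) d).getD
        s PySem.Dict.empty
      = (l.filter (fun k => secf k == s)).foldl (fun g k => g.insert k (vf k))
          (d.getD s PySem.Dict.empty) := by
  induction l generalizing d with
  | nil => rfl
  | cons k t ih =>
    simp only [List.foldl_cons, List.filter_cons]
    rw [ih]
    by_cases hx : secf k = s
    · rw [if_pos (by simpa using hx)]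
      rw [show (d.modify (secf k) PySem.Dict.empty (fun g => g.insert k (vf k))).getD s PySem.Dict.empty
            = (d.getD s PySem.Dict.empty).insert k (vf k) by
        rw [PySem.Dict.getD_modify]
        simp [hx]]
      rfl
    · rw [if_neg (by simpa using hx)]
      rw [show (d.modify (secf k) PySem.Dict.empty (fun g => g.insert k (vf k))).getD s PySem.Dict.empty
            = d.getD s PySem.Dict.empty by
        rw [PySem.Dict.getD_modify]
        rw [if_neg (fun h => hx h.symm)]]

theorem pv_inner_eq' (flatD : PySem.Dict String String) (ks : List String)
    (g : PySem.Dict String String) :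
    (ks.filter (fun k => flatD.contains k)).foldl (fun g k => g.insert k (flatD.getD k "")) g
      = (ks.filterMap (pvPres flatD)).foldl (fun g kv => g.insert kv.1 kv.2) g := by
  induction ks generalizing g with
  | nil => rfl
  | cons k t ih =>
    cases h : flatD.get? k with
    | none =>
      have hc : flatD.contains k = false := by rw [PySem.Dict.contains_eq_isSome_get?, h]; rfl
      simp [pvPres, h, hc, ih]
    | some v =>
      have hc : flatD.contains k = true := by rw [PySem.Dict.contains_eq_isSome_get?, h]; rfl
      have hd : flatD.getD k "" = v := PySem.Dict.getD_of_get?_eq_some flatD "" h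
      simp [pvPres, h, hc, hd, ih]

theorem pv_ofList_replicate (n : Nat) (s : String) :
    PySem.Set.ofList (List.replicate n s) = if n = 0 then [] else [s] := by
  induction n with
  | zero => rfl
  | succ m ih =>
    rw [List.replicate_succ, PySem.Set.ofList_cons, ih]
    cases m <;> simp [PySem.Set.discard]

-- assembling grouped blocks into pvOut
theorem pv_grp_nil_iff (flatD : PySem.Dict String String) (sk : String × List String) :
    pvGrp flatD sk = [] ↔ sk.2.filter (fun k => flatD.contains k) = [] := by
  have hm : (pvGrp flatD sk).map Prod.fst = sk.2.filter (fun k => flatD.contains k) := by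
    rw [pvGrp, pv_fst_filterMap_pres]
    apply List.filter_congr
    intro k _
    rw [PySem.Dict.contains_eq_isSome_get?]
  rw [← hm, List.map_eq_nil_iff]

theorem pv_combine (flatD : PySem.Dict String String) (secs : List (String × List String))
    (hnames : (secs.map Prod.fst).Nodup)
    (hsec : ∀ sk ∈ secs, ∀ k ∈ sk.2, (KEY_INFO.getD k (0, "")).2 = sk.1)
    (hkeys : ∀ sk ∈ secs, sk.2.Nodup) :
    (PySem.Set.ofList ((secs.flatMap (fun sk => sk.2.filter (fun k => flatD.contains k))).map
        (fun k => (KEY_INFO.getD k (0, "")).2))).map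
        (fun s => (s, (((secs.flatMap (fun sk => sk.2.filter (fun k => flatD.contains k))).filter
            (fun k => (KEY_INFO.getD k (0, "")).2 == s)).foldl
          (fun g k => g.insert k (flatD.getD k "")) (PySem.Dict.empty : PySem.Dict String String)).items))
      = pvOut flatD secs := by
  induction secs with
  | nil => rfl
  | cons sk rest ih =>
    have hnames' : (sk.1 :: rest.map Prod.fst).Nodup := by simpa using hnames
    have hni : sk.1 ∉ rest.map Prod.fst := (List.nodup_cons.mp hnames').1
    have hblocksec : ∀ k ∈ sk.2.filter (fun k => flatD.contains k),
        (KEY_INFO.getD k (0, "")).2 = sk.1 :=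
      fun k hk => hsec sk (by simp) k (List.mem_of_mem_filter hk)
    have hrestfst : ∀ y ∈ (rest.flatMap (fun sk => sk.2.filter (fun k => flatD.contains k))).map
        (fun k => (KEY_INFO.getD k (0, "")).2), y ∈ rest.map Prod.fst := by
      intro y hy
      simp only [List.mem_map, List.mem_flatMap, List.mem_filter] at hy
      obtain ⟨k, ⟨sk', hsk', hk, _⟩, rfl⟩ := hy
      rw [hsec sk' (by simp [hsk']) k hk]
      exact List.mem_map_of_mem hsk'
    have hmapblock : (sk.2.filter (fun k => flatD.contains k)).map
        (fun k => (KEY_INFO.getD k (0, "")).2)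
        = List.replicate (sk.2.filter (fun k => flatD.contains k)).length sk.1 := by
      rw [List.map_congr_left hblocksec, List.map_const']
    rw [List.flatMap_cons, List.map_append, hmapblock, PySem.Set.ofList_append,
      pv_ofList_replicate]
    by_cases hb : sk.2.filter (fun k => flatD.contains k) = []
    · rw [if_pos (by simp [hb])]
      rw [show pvOut flatD (sk :: rest) = pvOut flatD rest by
        simp [pvOut, (pv_grp_nil_iff flatD sk).mpr hb]]
      rw [hb]
      simp only [List.nil_append]
      exact ih hnames'.of_cons (fun s hs => hsec s (by simp [hs]))
        (fun s hs => hkeys s (by simp [hs]))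
    · have hg : pvGrp flatD sk ≠ [] := fun h => hb ((pv_grp_nil_iff flatD sk).mp h)
      rw [if_neg (by simpa [List.length_eq_zero_iff] using hb)]
      rw [PySem.Set.update_eq_append_filter]
      have hfilt : List.filter (fun y => !(PySem.Set.contains [sk.1] y))
          (PySem.Set.ofList ((rest.flatMap (fun sk => sk.2.filter (fun k => flatD.contains k))).map
            (fun k => (KEY_INFO.getD k (0, "")).2)))
          = PySem.Set.ofList ((rest.flatMap (fun sk => sk.2.filter (fun k => flatD.contains k))).map
            (fun k => (KEY_INFO.getD k (0, "")).2)) := by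
        apply List.filter_eq_self.mpr
        intro y hy
        have hym : y ∈ rest.map Prod.fst := hrestfst y ((PySem.Set.mem_ofList _ y).mp hy)
        have hne : y ≠ sk.1 := fun he => hni (he ▸ hym)
        simp only [PySem.Set.contains_eq_listContains]
        simp [hne]
      rw [hfilt, List.singleton_append, List.map_cons]
      have hsplit : List.filter (fun k => (KEY_INFO.getD k (0, "")).2 == sk.1)
            (sk.2.filter (fun k => flatD.contains k)
              ++ rest.flatMap (fun sk => sk.2.filter (fun k => flatD.contains k)))
          = sk.2.filter (fun k => flatD.contains k) := by
        rw [List.filter_append]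
        have h1 : List.filter (fun k => (KEY_INFO.getD k (0, "")).2 == sk.1)
            (sk.2.filter (fun k => flatD.contains k)) = sk.2.filter (fun k => flatD.contains k) := by
          apply List.filter_eq_self.mpr
          intro k hk
          simp [hblocksec k hk]
        have h2 : List.filter (fun k => (KEY_INFO.getD k (0, "")).2 == sk.1)
            (rest.flatMap (fun sk => sk.2.filter (fun k => flatD.contains k))) = [] := by
          apply List.filter_eq_nil_iff.mpr
          intro k hk
          have hkm : (KEY_INFO.getD k (0, "")).2 ∈ rest.map Prod.fst :=
            hrestfst _ (List.mem_map_of_mem hk)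
          have hne : (KEY_INFO.getD k (0, "")).2 ≠ sk.1 := fun he => hni (he ▸ hkm)
          simpa using hne
        rw [h1, h2, List.append_nil]
      rw [hsplit]
      have hinner : ((sk.2.filter (fun k => flatD.contains k)).foldl
            (fun g k => g.insert k (flatD.getD k ""))
            (PySem.Dict.empty : PySem.Dict String String)).items = pvGrp flatD sk := by
        rw [pv_inner_eq', ← pv_inner_eq]
        exact pv_grp_items flatD sk (hkeys sk (by simp))
      rw [hinner]
      have htail : (PySem.Set.ofList ((rest.flatMap (fun sk => sk.2.filter
            (fun k => flatD.contains k))).map (fun k => (KEY_INFO.getD k (0, "")).2))).map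
            (fun s => (s, ((List.filter (fun k => (KEY_INFO.getD k (0, "")).2 == s)
              (sk.2.filter (fun k => flatD.contains k)
                ++ rest.flatMap (fun sk => sk.2.filter (fun k => flatD.contains k)))).foldl
              (fun g k => g.insert k (flatD.getD k ""))
              (PySem.Dict.empty : PySem.Dict String String)).items))
          = pvOut flatD rest := by
        rw [← ih hnames'.of_cons (fun s hs => hsec s (by simp [hs]))
          (fun s hs => hkeys s (by simp [hs]))]
        apply List.map_congr_left
        intro s hs
        have hsmem : s ∈ rest.map Prod.fst := hrestfst s ((PySem.Set.mem_ofList _ s).mp hs)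
        have hne : s ≠ sk.1 := fun he => hni (he ▸ hsmem)
        rw [List.filter_append]
        have h0 : List.filter (fun k => (KEY_INFO.getD k (0, "")).2 == s)
            (sk.2.filter (fun k => flatD.contains k)) = [] := by
          apply List.filter_eq_nil_iff.mpr
          intro k hk
          rw [hblocksec k hk]
          simpa using fun he => hne he.symm
        rw [h0, List.nil_append]
      rw [htail]
      simp [pvOut, hg]

theorem pv_B_main (flat : List (String × String)) :
    nest_theme_py_alt flat = pvOut (PySem.Dict.ofList flat) SECTION_DEFS := by
  simp only [nest_theme_py_alt]
  rw [pv_hits_eq (PySem.Dict.ofList flat) (PySem.Dict.nodup_keys_ofList flat)]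
  rw [show pvCANONK = SECTION_DEFS.flatMap (fun sk => sk.2) from by decide, List.filter_flatMap]
  have hnd : ((SECTION_DEFS.flatMap (fun sk => sk.2.filter
      (fun k => (PySem.Dict.ofList flat).contains k))).foldl
      (fun d k => d.modify ((KEY_INFO.getD k (0, "")).2) PySem.Dict.empty
        (fun g => g.insert k ((PySem.Dict.ofList flat).getD k "")))
      (PySem.Dict.empty : PySem.Dict String (PySem.Dict String String))).keys.Nodup :=
    PySem.Dict.nodup_keys_foldl_modify_key _ (fun k => (KEY_INFO.getD k (0, "")).2)
      PySem.Dict.empty (fun _ k => fun g => g.insert k ((PySem.Dict.ofList flat).getD k "")) _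
      (by simp [PySem.Dict.keys, PySem.Dict.empty])
  rw [PySem.Dict.items_eq_map_keys _ hnd PySem.Dict.empty]
  rw [PySem.Dict.keys_foldl_modify_key]
  rw [show (PySem.Dict.empty : PySem.Dict String (PySem.Dict String String)).keys = [] from rfl]
  rw [PySem.Set.update_nil_left, List.map_map]
  rw [← pv_combine (PySem.Dict.ofList flat) SECTION_DEFS (by decide) (by decide) (by decide)]
  apply List.map_congr_left
  intro s _
  simp only [Function.comp_def]
  rw [pv_getD_fold_modify]
  rw [show (PySem.Dict.empty : PySem.Dict String (PySem.Dict String String)).getD s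
      PySem.Dict.empty = PySem.Dict.empty from rfl]

-- ===== VERDICT (by name: the statement is the Claim_ definition above) =====
theorem nest_theme_py_spec : Claim_equal_nest_theme_py := by
  intro flat _
  show nest_theme_py flat = nest_theme_py_alt flat
  rw [pv_A_main, pv_B_main]
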